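-- pv_equiv track=rewrite | github.com/b1ueskydragon/PythonGround | dailyOne/P180/a-stack-a-queue01.py | interleave_half
-- ===== SOURCE A (Python) =====
-- from queue import Queue
-- import math
--
-- def interleave_half(stack):
--     """
--     -1th
--     S [3,2,1]
--     Q (5,4)
--
--     Q (1,5,2,4,3)
--     S [1,5,2,4,3]
--     """
--     qu = Queue()
--     size = len(stack)
--
--     pivot = size // 2
--     move = int(math.ceil(size / 2))  # `pivot + 1` if is odd
--
--     while stack:
--         qu.put(stack.pop())
--
--     for _ in range(pivot):
--         qu.put(qu.get())
--
--     for _ in range(move):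
--         stack.append(qu.get())
--
--     for _ in range(pivot):
--         qu.put(stack.pop())
--         qu.put(qu.get())
--
--     if stack:
--         qu.put(stack.pop())
--
--     while not qu.empty():
--         stack.append(qu.get())
--
--     return stack
-- ===== SOURCE B (Python) =====
-- def _weave(first, second):
--     # alternate elements, starting with first; leftover of the (no shorter) first is appended
--     out = []
--     for a, b in zip(first, second):
--         out += [a, b]
--     return out + first[len(second):]
--
--
-- def interleave_half(stack):
--     move = (len(stack) + 1) // 2
--     result = _weave(stack[:move], list(reversed(stack[move:])))
--     stack[:] = result  # same in-place mutation as A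
--     return stack
-- ===== Notes on version B (the rewrite author's own statement) =====
-- stated objective: faster
-- what changed: Replaced the queue simulation (pour the stack into a Queue, then five rotation/transfer passes) by a direct construction: zip the first half with the reversed second half; slicing and zip avoid all per-element Queue.put/get calls (which take a lock each).
import Mathlib
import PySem

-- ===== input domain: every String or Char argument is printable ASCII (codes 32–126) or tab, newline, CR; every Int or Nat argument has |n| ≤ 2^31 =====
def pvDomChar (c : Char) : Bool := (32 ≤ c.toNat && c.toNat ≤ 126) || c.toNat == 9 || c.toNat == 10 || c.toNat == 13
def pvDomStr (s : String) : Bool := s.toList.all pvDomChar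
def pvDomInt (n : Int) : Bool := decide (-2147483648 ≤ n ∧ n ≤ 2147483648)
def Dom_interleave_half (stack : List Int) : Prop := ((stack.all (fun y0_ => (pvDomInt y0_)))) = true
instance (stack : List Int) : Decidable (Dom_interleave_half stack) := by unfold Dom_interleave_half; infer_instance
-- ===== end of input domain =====

-- B replaces A's queue simulation (five rotation/transfer passes) by a direct zip-interleave of the
-- first half with the reversed second half; both A and B mutate the argument list in place and
-- return it — the theorems below are about the returned value.

-- ===== PORT A =====
-- for _ in range(n): qu.put(qu.get())   (queue front = list head, put appends at the end;
-- the queue is never empty when get() runs, so tail/take 1 is exact)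
def aRotate : Nat → List Int → List Int
  | 0, q => q
  | n+1, q => aRotate n (q.tail ++ q.take 1)

-- for _ in range(n): stack.append(qu.get())
def aMove : Nat → List Int × List Int → List Int × List Int
  | 0, sq => sq
  | n+1, sq => aMove n (sq.1 ++ sq.2.take 1, sq.2.tail)

-- for _ in range(n): qu.put(stack.pop()); qu.put(qu.get())
-- (the stack is never empty when pop() runs in A, so getLast?.toList/dropLast is exact)
def aInter : Nat → List Int × List Int → List Int × List Int
  | 0, sq => sq
  | n+1, sq =>
      let q1 := sq.2 ++ sq.1.getLast?.toList
      aInter n (sq.1.dropLast, q1.tail ++ q1.take 1)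

def interleave_half (stack : List Int) : List Int :=
  let size := stack.length
  let pivot := size / 2
  let move := (size + 1) / 2          -- int(math.ceil(size / 2)): exact for sizes of lists
  let q1 := aRotate pivot stack.reverse  -- 'while stack: qu.put(stack.pop())' pours stack reversed into qu
  let sq2 := aMove move ([], q1)
  let sq3 := aInter pivot sq2
  -- if stack: qu.put(stack.pop())
  let sq4 := if sq3.1.isEmpty then sq3 else (sq3.1.dropLast, sq3.2 ++ sq3.1.getLast?.toList)
  sq4.1 ++ sq4.2                      -- while not qu.empty(): stack.append(qu.get())

-- ===== PORT B =====
-- _weave: 'for a, b in zip(first, second): out += [a, b]' then 'out + first[len(second):]'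
def weave (first second : List Int) : List Int :=
  (first.zip second).foldl (fun out p => out ++ [p.1, p.2]) [] ++ first.drop second.length

def interleave_half_alt (stack : List Int) : List Int :=
  let move := (stack.length + 1) / 2  -- (len(stack) + 1) // 2 on a nonnegative length
  weave (stack.take move) ((stack.drop move).reverse)

-- ===== PRECONDITION & SPEC =====
def Spec_interleave_half (stack : List Int) (out : List Int) : Prop := out = interleave_half_alt stack
instance (stack : List Int) (out : List Int) : Decidable (Spec_interleave_half stack out) := by unfold Spec_interleave_half; infer_instance

-- ===== CLAIM (what is proved, stated in full; the proofs are below) =====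
def Claim_equal_interleave_half : Prop := ∀ (stack : List Int), Dom_interleave_half stack → Spec_interleave_half stack (interleave_half stack)

-- ===== LEMMAS AND PROOFS =====

-- proof-side recursive form of weave (for second no longer than first)
def wv : List Int → List Int → List Int
  | [], _ => []
  | f, [] => f
  | a::as, b::bs => a :: b :: wv as bs

theorem wv_nil_right (f : List Int) : wv f [] = f := by
  cases f <;> rfl

theorem zipfold_wv : ∀ (s f acc : List Int), s.length ≤ f.length →
    (f.zip s).foldl (fun out p => out ++ [p.1, p.2]) acc ++ f.drop s.length = acc ++ wv f s := by
  intro s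
  induction s with
  | nil => intro f acc _; simp [wv_nil_right]
  | cons b bs ih =>
      intro f acc h
      cases f with
      | nil => simp at h
      | cons a as =>
          simp only [List.zip_cons_cons, List.foldl_cons, List.length_cons, List.drop_succ_cons]
          rw [ih as (acc ++ [a, b]) (by simpa using h)]
          simp [wv]

theorem weave_eq_wv (f s : List Int) (h : s.length ≤ f.length) : weave f s = wv f s := by
  have := zipfold_wv s f [] h
  simpa [weave] using this

theorem wv_concat : ∀ (f q : List Int) (a : Int), f.length = q.length →
    wv (f ++ [a]) q = wv f q ++ [a] := by
  intro f
  induction f with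
  | nil => intro q a h; cases q with
      | nil => rfl
      | cons y ys => simp at h
  | cons x xs ih =>
      intro q a h
      cases q with
      | nil => simp at h
      | cons y ys =>
          simp only [List.cons_append, wv]
          rw [ih ys a (by simpa using h)]

theorem aRotate_spec : ∀ (pre post : List Int), aRotate pre.length (pre ++ post) = post ++ pre := by
  intro pre
  induction pre with
  | nil => intro post; simp [aRotate]
  | cons x xs ih =>
      intro post
      have hstep : aRotate (xs.length + 1) ((x :: xs) ++ post)
          = aRotate xs.length (xs ++ (post ++ [x])) := by
        simp [aRotate]
      simp only [List.length_cons]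
      rw [hstep, ih (post ++ [x])]
      simp

theorem aMove_spec : ∀ (k : Nat) (s q : List Int), k ≤ q.length →
    aMove k (s, q) = (s ++ q.take k, q.drop k) := by
  intro k
  induction k with
  | zero => intro s q _; simp [aMove]
  | succ n ih =>
      intro s q h
      cases q with
      | nil => simp at h
      | cons y ys =>
          have : aMove (n + 1) (s, y :: ys) = aMove n (s ++ [y], ys) := by
            simp [aMove]
          rw [this, ih (s ++ [y]) ys (by simpa using h)]
          simp

theorem aInter_spec : ∀ (f q acc rest : List Int), f.length = q.length →
    aInter f.length (rest ++ f.reverse, q ++ acc) = (rest, acc ++ wv f q) := by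
  intro f
  induction f with
  | nil => intro q acc rest h
           have hq : q = [] := by simpa using h.symm
           subst hq; simp [aInter, wv]
  | cons a as ih =>
      intro q acc rest h
      cases q with
      | nil => simp at h
      | cons b bs =>
          have hstep : aInter (as.length + 1) (rest ++ (a :: as).reverse, (b :: bs) ++ acc)
              = aInter as.length (rest ++ as.reverse, bs ++ (acc ++ [a, b])) := by
            have hL : rest ++ (a :: as).reverse = (rest ++ as.reverse) ++ [a] := by simp
            rw [hL]
            simp only [aInter, List.dropLast_concat, List.getLast?_concat, Option.toList_some]
            congr 2
            simp
          simp only [List.length_cons]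
          rw [hstep, ih bs (acc ++ [a, b]) rest (by simpa using h)]
          simp [wv]

-- ===== VERDICT (by name: the statement is the Claim_ definition above) =====

theorem interleave_half_spec : Claim_equal_interleave_half := by
  intro stack _
  show interleave_half stack = interleave_half_alt stack
  simp only [interleave_half, interleave_half_alt]
  set n := stack.length with hn
  set p := n / 2 with hp
  set m := (n + 1) / 2 with hm
  set first := stack.take m with hfirst
  set rest := stack.drop m with hrest
  have hflen : first.length = m := by
    rw [hfirst, List.length_take, ← hn]; omega
  have hrlen : rest.length = n - m := by
    rw [hrest, List.length_drop, ← hn]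
  have hrev : stack.reverse = rest.reverse ++ first.reverse := by
    rw [hfirst, hrest, ← List.reverse_append, List.take_append_drop]
  have hprev : (rest.reverse).length = p := by
    rw [List.length_reverse, hrlen]; omega
  have h1 : aRotate p stack.reverse = first.reverse ++ rest.reverse := by
    rw [hrev, ← hprev, aRotate_spec]
  have h2 : aMove m ([], aRotate p stack.reverse) = (first.reverse, rest.reverse) := by
    rw [h1, aMove_spec m [] _ (by simp [hflen, hrlen])]
    have ht : (first.reverse ++ rest.reverse).take m = first.reverse := by
      rw [show m = first.reverse.length by simp [hflen]]
      exact List.take_left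
    have hd : (first.reverse ++ rest.reverse).drop m = rest.reverse := by
      rw [show m = first.reverse.length by simp [hflen]]
      exact List.drop_left
    rw [ht, hd]; simp
  set fp := first.take p with hfp
  set fr := first.drop p with hfr
  have hfplen : fp.length = p := by
    rw [hfp, List.length_take, hflen]; omega
  have hfrlen : fr.length = m - p := by
    rw [hfr, List.length_drop, hflen]
  have hsplit : first = fp ++ fr := (List.take_append_drop p first).symm
  have hfrev : first.reverse = fr.reverse ++ fp.reverse := by
    rw [hsplit, List.reverse_append]
  have h3 : aInter p (first.reverse, rest.reverse) = (fr.reverse, wv fp rest.reverse) := by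
    have h := aInter_spec fp rest.reverse [] fr.reverse (by rw [hfplen, hprev])
    rw [hfplen, List.append_nil, List.nil_append] at h
    rw [hfrev]; exact h
  rw [h2, h3]
  by_cases hpar : m = p
  · -- even length: the leftover half-stack fr is empty
    have hfrnil : fr = [] := by
      have : fr.length = 0 := by omega
      exact List.length_eq_zero_iff.mp this
    have hfpfull : fp = first := by
      rw [hfp, List.take_of_length_le (by omega)]
    rw [weave_eq_wv first rest.reverse (by rw [hprev, hflen]; omega)]
    simp [hfrnil, hfpfull]
  · -- odd length: fr is a singleton
    have hm1 : fr.length = 1 := by omega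
    obtain ⟨a, ha⟩ := List.length_eq_one_iff.mp hm1
    rw [weave_eq_wv first rest.reverse (by rw [hprev, hflen]; omega)]
    rw [hsplit, ha, wv_concat fp rest.reverse a (by rw [hfplen, hprev])]
    simp
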